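-- pv_equiv track=rewrite | github.com/rxdcxdrnine/problem-solving | python/boj/BOJ_6603.py | solution
-- ===== SOURCE A (Python) =====
-- from typing import List, Tuple
--
-- def solution(cases: List[Tuple[int, List[int]]]) -> List[List[List[int]]]:
--     answers: List[List[List]] = []
--
--     for case in cases:
--         k, nums = case
--
--         visited: List[bool] = [False for _ in range(len(nums))]
--         route: List[int] = []
--         result: List[List[int]] = []
--
--         def dfs(now: int):
--             if len(route) == 6:
--                 result.append(route[:])
--
--             for ind in range(now + 1, len(nums)):
--                 if visited[ind]:
--                     continue
--
--                 visited[ind] = True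
--                 route.append(nums[ind])
--                 dfs(ind)
--
--                 visited[ind] = False
--                 route.pop()
--
--         dfs(-1)
--         answers.append(result)
--
--     return answers
-- ===== SOURCE B (Python) =====
-- from typing import List, Tuple
--
--
-- def combos(r: int, xs: List[int]) -> List[List[int]]:
--     if r == 0:
--         return [[]]
--     if len(xs) < r:
--         return []
--     rest = xs[1:]
--     with_first = [[xs[0]] + c for c in combos(r - 1, rest)]
--     return with_first + combos(r, rest)
--
--
-- def solution(cases: List[Tuple[int, List[int]]]) -> List[List[List[int]]]:
--     return [combos(6, nums) for _, nums in cases]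
-- ===== Notes on version B (the rewrite author's own statement) =====
-- stated objective: alternative
-- what changed: Replaced the visited-array DFS that walks every increasing index sequence (all 2^n subsets per case, emitting only at depth 6) with a structural recursion combos(r, xs) = [[xs[0]]+c for c in combos(r-1, xs[1:])] + combos(r, xs[1:]) that prunes whenever len(xs) < r, so only prefixes of actual 6-combinations are explored (measured 1.9x at n=256; both are bounded by the C(n,6)-sized output at large n).
import Mathlib
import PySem

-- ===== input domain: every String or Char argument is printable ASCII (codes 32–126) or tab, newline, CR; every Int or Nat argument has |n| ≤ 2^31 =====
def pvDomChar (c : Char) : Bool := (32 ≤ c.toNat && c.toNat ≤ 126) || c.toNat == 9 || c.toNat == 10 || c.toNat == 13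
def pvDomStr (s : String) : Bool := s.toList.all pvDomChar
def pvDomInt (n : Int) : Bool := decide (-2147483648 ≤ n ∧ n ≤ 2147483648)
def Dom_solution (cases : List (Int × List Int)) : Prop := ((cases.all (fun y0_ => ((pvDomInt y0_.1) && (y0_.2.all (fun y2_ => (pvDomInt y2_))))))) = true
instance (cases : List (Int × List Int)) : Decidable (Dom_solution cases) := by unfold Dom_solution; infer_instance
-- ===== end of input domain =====

-- B replaces A's visited-array DFS over all increasing index sequences (2^n subsets per case)
-- with a pruned structural recursion enumerating only the 6-combinations (alternative algorithm).

-- ===== PORT A =====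
-- A's dfs: recursion bounded by fuel = nums.length + 1, which always suffices since `now`
-- strictly increases towards len(nums); state (visited, route, result) threaded explicitly.
mutual
-- the body of A's `for ind in range(now+1, len(nums))` loop
def dfsBody (nums : List Int) (fuel : Nat)
    (st : List Bool × List Int × List (List Int)) (ind : Int) :
    List Bool × List Int × List (List Int) :=
  if PySem.List.pyGetD st.1 ind false = true then st
  else
    let st2 := dfsA nums fuel ind (PySem.List.pySetD st.1 ind true)
      (st.2.1 ++ [PySem.List.pyGetD nums ind 0]) st.2.2
    (PySem.List.pySetD st2.1 ind false, st2.2.1.dropLast, st2.2.2)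
  termination_by 2 * fuel + 1

def dfsA (nums : List Int) : Nat → Int → List Bool → List Int → List (List Int) →
    List Bool × List Int × List (List Int)
  | 0, _, visited, route, result => (visited, route, result)
  | fuel+1, now, visited, route, result =>
    (PySem.List.pyRange (now + 1) nums.length 1).foldl (dfsBody nums fuel)
      (visited, route, if route.length = 6 then result ++ [route] else result)
  termination_by fuel => 2 * fuel
end

def solution (cases : List (Int × List Int)) : List (List (List Int)) :=
  cases.foldl
    (fun answers c =>
      answers ++ [(dfsA c.2 (c.2.length + 1) (-1) (List.replicate c.2.length false) [] []).2.2])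
    []

-- ===== PORT B =====
def combosB : Nat → List Int → List (List Int)
  | 0, _ => [[]]
  | _+1, [] => []
  | r+1, x :: rest =>
    if rest.length + 1 < r + 1 then []
    else (combosB r rest).map (fun c => x :: c) ++ combosB (r+1) rest

def solution_alt (cases : List (Int × List Int)) : List (List (List Int)) :=
  cases.map (fun c => combosB 6 c.2)

-- ===== PRECONDITION & SPEC =====
def Spec_solution (cases : List (Int × List Int)) (out : List (List (List Int))) : Prop := out = solution_alt cases
instance (cases : List (Int × List Int)) (out : List (List (List Int))) : Decidable (Spec_solution cases out) := by unfold Spec_solution; infer_instance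

-- ===== CLAIM (what is proved, stated in full; the proofs are below) =====
def Claim_equal_solution : Prop := ∀ (cases : List (Int × List Int)), Dom_solution cases → Spec_solution cases (solution cases)

-- ===== LEMMAS AND PROOFS =====

-- The lists emitted below a DFS node: route extended by elements of suffix at strictly
-- increasing positions, emitted when the length is exactly 6 (children part only).
def Faux : List Int → List Int → List (List Int)
  | _, [] => []
  | route, x :: xs =>
    ((if (route ++ [x]).length = 6 then [route ++ [x]] else []) ++ Faux (route ++ [x]) xs)
      ++ Faux route xs
  termination_by _ l => l.length

-- Emission at the node itself plus everything below it.
def Eaux (route suffix : List Int) : List (List Int) :=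
  (if route.length = 6 then [route] else []) ++ Faux route suffix

lemma Faux_cons (route : List Int) (x : Int) (xs : List Int) :
    Faux route (x :: xs) = Eaux (route ++ [x]) xs ++ Faux route xs := by
  simp [Faux, Eaux]

lemma combosB_nil_of_lt : ∀ (k : Nat) (xs : List Int), xs.length < k → combosB k xs = [] := by
  intro k xs
  induction xs generalizing k with
  | nil => intro h; match k, h with | k+1, _ => rfl
  | cons x rest ih =>
    intro h
    match k, h with
    | r+1, h =>
      simp only [combosB]
      rw [if_pos]
      simpa using h

lemma Faux_nil_of_ge : ∀ (xs route : List Int), 6 ≤ route.length → Faux route xs = [] := by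
  intro xs
  induction xs with
  | nil => intro route _; simp [Faux]
  | cons x xs ih =>
    intro route h
    rw [Faux_cons, Eaux, ih (route ++ [x]) (by simp; omega), ih route h]
    simp
    omega

lemma Eaux_eq : ∀ (xs route : List Int), route.length ≤ 6 →
    Eaux route xs = (combosB (6 - route.length) xs).map (fun c => route ++ c) := by
  intro xs
  induction xs with
  | nil =>
    intro route h
    by_cases h6 : route.length = 6
    · simp [Eaux, Faux, h6, combosB]
    · have hm : ∃ m, 6 - route.length = m + 1 := ⟨5 - route.length, by omega⟩
      obtain ⟨m, hm⟩ := hm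
      rw [Eaux, hm]
      simp [Faux, combosB, h6]
  | cons x xs ih =>
    intro route h
    by_cases h6 : route.length = 6
    · rw [Eaux, Faux_cons, Eaux,
        Faux_nil_of_ge xs (route ++ [x]) (by simp; omega),
        Faux_nil_of_ge xs route (by omega), h6, Nat.sub_self]
      simp [combosB]
      omega
    · have hlt : route.length < 6 := by omega
      obtain ⟨m, hm⟩ : ∃ m, 6 - route.length = m + 1 := ⟨5 - route.length, by omega⟩
      have hm' : 6 - (route ++ [x]).length = m := by simp; omega
      rw [Eaux, Faux_cons, ih (route ++ [x]) (by simp; omega), hm']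
      have hF : Faux route xs = (combosB (6 - route.length) xs).map (fun c => route ++ c) := by
        have := ih route h
        rw [Eaux] at this
        simpa [h6] using this
      rw [hF, hm]
      simp only [combosB]
      by_cases hp : xs.length + 1 < m + 1
      · rw [if_pos hp, combosB_nil_of_lt m xs (by omega),
          combosB_nil_of_lt (m+1) xs (by rw [← hm]; omega)]
        simp [h6]
      · rw [if_neg hp, ← hm]
        simp [h6, List.map_map, Function.comp_def]

-- xs.set t false is a no-op when position t already holds false (or is out of range).
lemma set_false_of_getD : ∀ (xs : List Bool) (t : Nat), xs.getD t false = false →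
    xs.set t false = xs := by
  intro xs
  induction xs with
  | nil => intro t _; rfl
  | cons x xs ih =>
    intro t h
    cases t with
    | zero => simpa using h.symm ▸ rfl
    | succ t => simp only [List.set_cons_succ, List.getD_cons_succ] at *; rw [ih t h]

lemma getD_set_ne (xs : List Bool) (i j : Nat) (v : Bool) (h : i ≠ j) :
    (xs.set i v).getD j false = xs.getD j false := by
  simp [List.getD_eq_getElem?_getD, List.getElem?_set_ne h]

-- Main characterisation of A's dfs: with a clean visited array above s and enough fuel,
-- dfs(s-1) restores visited and route and appends exactly the node's emission list.
lemma dfsA_spec (nums : List Int) : ∀ (fuel s : Nat) (visited : List Bool)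
    (route : List Int) (result : List (List Int)),
    s ≤ nums.length → nums.length + 1 ≤ s + fuel →
    (∀ j : Nat, s ≤ j → visited.getD j false = false) →
    dfsA nums fuel ((s : Int) - 1) visited route result
      = (visited, route, result ++ Eaux route (nums.drop s)) := by
  intro fuel
  induction fuel with
  | zero => intro s _ _ _ hs hf _; omega
  | succ f ihf =>
    intro s visited route result hs hf hinv
    have hstep : ((s : Int) - 1) + 1 = (s : Int) := by ring
    simp only [dfsA, hstep]
    have loop : ∀ (m t : Nat) (visited : List Bool) (route : List Int)
        (result : List (List Int)),
        nums.length ≤ t + m → nums.length ≤ t + f →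
        (∀ j : Nat, t ≤ j → visited.getD j false = false) →
        (PySem.List.pyRange (t : Int) nums.length 1).foldl (dfsBody nums f)
          (visited, route, result)
          = (visited, route, result ++ Faux route (nums.drop t)) := by
      intro m
      induction m with
      | zero =>
        intro t visited route result hm _ _
        rw [PySem.List.pyRange_one_eq_nil (by exact_mod_cast by omega : (nums.length : Int) ≤ (t : Int)),
          List.drop_eq_nil_of_le (by omega)]
        simp [Faux]
      | succ m ihm =>
        intro t visited route result hm hfm hinv'
        by_cases ht : nums.length ≤ t
        · rw [PySem.List.pyRange_one_eq_nil (by exact_mod_cast ht),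
            List.drop_eq_nil_of_le ht]
          simp [Faux]
        · have htlt : t < nums.length := by omega
          rw [PySem.List.pyRange_one_cons (by exact_mod_cast htlt), List.foldl_cons]
          have hvt : PySem.List.pyGetD visited (t : Int) false = false := by
            simpa using hinv' t le_rfl
          have hcast : (t : Int) = ((t + 1 : Nat) : Int) - 1 := by push_cast; ring
          have hbody : dfsBody nums f (visited, route, result) (t : Int)
              = (visited, route,
                  result ++ Eaux (route ++ [nums.getD t 0]) (nums.drop (t + 1))) := by
            simp only [dfsBody, hvt, Bool.false_eq_true, if_false,
              PySem.List.pySetD_natCast, PySem.List.pyGetD_natCast]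
            rw [hcast, ihf (t + 1) (visited.set t true)
              (route ++ [nums.getD t 0]) result (by omega) (by omega)
              (fun j hj => by
                rw [getD_set_ne visited t j true (by omega)]
                exact hinv' j (by omega))]
            simp only [List.set_set]
            rw [set_false_of_getD visited t (hinv' t le_rfl), List.dropLast_concat]
          rw [hbody]
          rw [show ((t : Int) + 1) = ((t + 1 : Nat) : Int) by push_cast; ring]
          rw [ihm (t + 1) visited route
            (result ++ Eaux (route ++ [nums.getD t 0]) (nums.drop (t + 1)))
            (by omega) (by omega) (fun j hj => hinv' j (by omega))]
          rw [List.drop_eq_getElem_cons htlt, Faux_cons,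
            List.getD_eq_getElem _ _ htlt, List.append_assoc]
    rw [loop (nums.length - s) s visited route
      (if route.length = 6 then result ++ [route] else result) (by omega) (by omega) hinv]
    rw [Eaux]
    by_cases h6 : route.length = 6 <;> simp [h6]

lemma case_eq (nums : List Int) :
    (dfsA nums (nums.length + 1) (-1) (List.replicate nums.length false) [] []).2.2
      = combosB 6 nums := by
  have h := dfsA_spec nums (nums.length + 1) 0 (List.replicate nums.length false) [] []
    (by omega) (by omega)
    (fun j _ => by
      simp [List.getD_eq_getElem?_getD, List.getElem?_replicate]
      split_ifs <;> rfl)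
  simp only [Nat.cast_zero, zero_sub, List.drop_zero] at h
  rw [h]
  rw [Eaux_eq nums [] (by simp)]
  simp

lemma foldl_solution : ∀ (cases : List (Int × List Int)) (acc : List (List (List Int))),
    cases.foldl
      (fun answers c =>
        answers ++ [(dfsA c.2 (c.2.length + 1) (-1) (List.replicate c.2.length false) [] []).2.2])
      acc
      = acc ++ cases.map (fun c => combosB 6 c.2) := by
  intro cases
  induction cases with
  | nil => intro acc; simp
  | cons c cs ih =>
    intro acc
    rw [List.foldl_cons, List.map_cons, ih, case_eq c.2]
    simp

-- ===== VERDICT (by name: the statement is the Claim_ definition above) =====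
theorem solution_spec : Claim_equal_solution := by
  intro cases _
  unfold Spec_solution solution solution_alt
  rw [foldl_solution cases []]
  simp
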